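-- pv_equiv track=rewrite | github.com/shurshilov/faracrm | backend/base/system/dotorm/dotorm/databases/abstract/dialect.py | convert_placeholders
-- ===== SOURCE A (Python) =====
-- def convert_placeholders(stmt: str) -> str:
--     """Convert %s to $1, $2, $3... in a single pass."""
--     if "%s" not in stmt:
--         return stmt
--     parts = stmt.split("%s")
--     result = [parts[0]]
--     for i, part in enumerate(parts[1:], 1):
--         result.append(f"${i}")
--         result.append(part)
--     return "".join(result)
-- ===== SOURCE B (Python) =====
-- def convert_placeholders(stmt: str) -> str:
--     """Single left-to-right scan: copy chars, replacing each "%s" with the next "$n"."""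
--     out = []
--     n = 0
--     i = 0
--     L = len(stmt)
--     while i < L:
--         if stmt.startswith("%s", i):
--             n += 1
--             out.append(f"${n}")
--             i += 2
--         else:
--             out.append(stmt[i])
--             i += 1
--     return "".join(out)
-- ===== Notes on version B (the rewrite author's own statement) =====
-- stated objective: alternative
-- what changed: Replaced the split-on-%s / enumerate / join pipeline with a single left-to-right index scan that copies characters and emits $n from a running counter whenever it sees %s, with no guard clause and no parts list.
import Mathlib
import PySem

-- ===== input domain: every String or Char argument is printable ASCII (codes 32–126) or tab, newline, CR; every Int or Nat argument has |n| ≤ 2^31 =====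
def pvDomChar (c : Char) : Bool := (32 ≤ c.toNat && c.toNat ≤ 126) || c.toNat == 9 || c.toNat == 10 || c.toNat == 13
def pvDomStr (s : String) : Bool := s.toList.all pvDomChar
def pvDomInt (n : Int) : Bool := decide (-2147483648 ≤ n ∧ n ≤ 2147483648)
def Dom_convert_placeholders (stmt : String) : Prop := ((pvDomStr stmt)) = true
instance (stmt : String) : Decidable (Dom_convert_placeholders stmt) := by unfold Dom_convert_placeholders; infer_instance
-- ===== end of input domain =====

-- B replaces A's split-on-"%s"/enumerate/join pipeline with one left-to-right scan and a counter (alternative, same cost).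


-- ===== PORT A =====
-- split(".%s") never returns an empty list, so Python's parts[0] is parts.headD [].
def convert_placeholders (stmt : String) : String :=
  if PySem.Str.isIn "%s" stmt = false then stmt
  else
    let parts := PySem.Chars.splitOn stmt.toList ['%', 's']
    let result : List (List Char) := [parts.headD []]
    let result :=
      ((parts.drop 1).zipIdx 1).foldl
        (fun acc pi => (acc ++ ['$' :: (PySem.Int.toStr (pi.2 : Int)).toList]) ++ [pi.1]) result
    String.ofList (PySem.Chars.join [] result)

-- ===== PORT B =====
-- the while loop of Source B: i-scan with startswith("%s", i) becomes structural recursion on the char list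
def convertGo (n : Nat) (cs : List Char) : List Char :=
  match cs with
  | [] => []
  | '%' :: 's' :: rest => '$' :: ((PySem.Int.toStr ((n : Int) + 1)).toList ++ convertGo (n + 1) rest)
  | c :: rest => c :: convertGo n rest

def convert_placeholders_alt (stmt : String) : String :=
  String.ofList (convertGo 0 stmt.toList)

-- ===== PRECONDITION & SPEC =====
def Spec_convert_placeholders (stmt : String) (out : String) : Prop := out = convert_placeholders_alt stmt
instance (stmt : String) (out : String) : Decidable (Spec_convert_placeholders stmt out) := by unfold Spec_convert_placeholders; infer_instance

-- ===== CLAIM (what is proved, stated in full; the proofs are below) =====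
def Claim_equal_convert_placeholders : Prop := ∀ (stmt : String), Dom_convert_placeholders stmt → Spec_convert_placeholders stmt (convert_placeholders stmt)

-- ===== LEMMAS AND PROOFS =====

-- reference splitter: what splitOn on separator "%s" computes
def pvCons (c : Char) (ls : List (List Char)) : List (List Char) :=
  match ls with
  | [] => [[c]]
  | p :: ps => (c :: p) :: ps

def pvSplit (cs : List Char) : List (List Char) :=
  match cs with
  | [] => [[]]
  | '%' :: 's' :: rest => [] :: pvSplit rest
  | c :: rest => pvCons c (pvSplit rest)

-- rendering of the tail pieces with counters n+1, n+2, ...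
def renderTail (n : Nat) (ps : List (List Char)) : List Char :=
  match ps with
  | [] => []
  | p :: rest => '$' :: (PySem.Int.toStr ((n : Nat) + 1)).toList ++ p ++ renderTail (n + 1) rest

theorem pvSplit_ne_nil (cs : List Char) : pvSplit cs ≠ [] := by
  induction cs using pvSplit.induct <;> simp_all [pvSplit, pvCons]
  rename_i c rest _ _
  cases hps : pvSplit rest <;> simp

theorem pvSplit_cons_ne (c : Char) (rest : List Char)
    (h : List.isPrefixOf ['%', 's'] (c :: rest) = false) :
    pvSplit (c :: rest) = pvCons c (pvSplit rest) := by
  rw [pvSplit.eq_def]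
  split
  · simp_all
  · rename_i e1 e2
    injection e2 with f1 f2
    subst f1; subst f2
    simp [List.isPrefixOf] at h
  · rename_i x heq
    injection heq with f1 f2
    subst f1; subst f2
    rfl

theorem convertGo_cons_ne (n : Nat) (c : Char) (rest : List Char)
    (h : List.isPrefixOf ['%', 's'] (c :: rest) = false) :
    convertGo n (c :: rest) = c :: convertGo n rest := by
  rw [convertGo.eq_def]
  split
  · simp_all
  · rename_i e1 e2
    injection e2 with f1 f2
    subst f1; subst f2
    simp [List.isPrefixOf] at h
  · rename_i x heq
    injection heq with f1 f2
    subst f1; subst f2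
    rfl

theorem join_nil_eq_flatten (l : List (List Char)) : PySem.Chars.join [] l = l.flatten := by
  induction l with
  | nil => rfl
  | cons h t ih => cases t <;> simp_all [PySem.Chars.join, List.intercalate, List.intersperse]

theorem go_eq_pvSplit (fuel : Nat) (l cur : List Char) (acc : List (List Char))
    (h : l.length ≤ fuel) :
    PySem.Chars.splitOn.go ['%', 's'] fuel l cur acc =
      acc.reverse ++ (match pvSplit l with
        | [] => [cur.reverse]
        | p :: ps => (cur.reverse ++ p) :: ps) := by
  induction fuel generalizing l cur acc with
  | zero =>
    have : l = [] := by cases l <;> simp_all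
    subst this
    simp [PySem.Chars.splitOn.go, pvSplit]
  | succ fuel ih =>
    match l with
    | [] => simp [PySem.Chars.splitOn.go, pvSplit]
    | c :: rest =>
      by_cases hp : List.isPrefixOf ['%', 's'] (c :: rest) = true
      · obtain ⟨c2, rest2, rfl⟩ : ∃ c2 rest2, rest = c2 :: rest2 := by
          cases rest with
          | nil => simp [List.isPrefixOf] at hp
          | cons a b => exact ⟨a, b, rfl⟩
        have hc : c = '%' ∧ c2 = 's' := by
          simp [List.isPrefixOf] at hp
          exact ⟨hp.1.symm, hp.2.symm⟩
        obtain ⟨rfl, rfl⟩ := hc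
        rw [PySem.Chars.splitOn.go]
        rw [if_pos hp]
        have hd : List.drop (List.length ['%', 's']) ('%' :: 's' :: rest2) = rest2 := rfl
        rw [hd]
        have hlen : rest2.length ≤ fuel := by simp at h; omega
        rw [ih _ [] _ hlen]
        have hne := pvSplit_ne_nil rest2
        cases hps : pvSplit rest2 with
        | nil => exact absurd hps hne
        | cons p ps => simp [pvSplit, hps]
      · rw [PySem.Chars.splitOn.go]
        rw [if_neg hp]
        have hlen : rest.length ≤ fuel := by simp at h; omega
        rw [ih _ (c :: cur) _ hlen]
        rw [pvSplit_cons_ne c rest (eq_false_of_ne_true hp)]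
        have hne := pvSplit_ne_nil rest
        cases hps : pvSplit rest with
        | nil => exact absurd hps hne
        | cons p ps => simp [hps, pvCons]

theorem splitOn_eq_pvSplit (l : List Char) :
    PySem.Chars.splitOn l ['%', 's'] = pvSplit l := by
  rw [PySem.Chars.splitOn, go_eq_pvSplit _ _ _ _ (by omega)]
  have hne := pvSplit_ne_nil l
  cases hps : pvSplit l with
  | nil => exact absurd hps hne
  | cons p ps => simp

theorem convertGo_eq_render (cs : List Char) (n : Nat) :
    convertGo n cs = (pvSplit cs).headD [] ++ renderTail n (pvSplit cs).tail := by
  induction cs using pvSplit.induct generalizing n with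
  | case1 => simp [convertGo, pvSplit, renderTail]
  | case2 rest ih =>
    have hne := pvSplit_ne_nil rest
    cases hps : pvSplit rest with
    | nil => exact absurd hps hne
    | cons p ps =>
      show '$' :: ((PySem.Int.toStr ((n : Int) + 1)).toList ++ convertGo (n + 1) rest) = _
      simp [pvSplit, hps, renderTail, ih (n + 1)]
  | case3 c rest h1 ih =>
    have hpre : List.isPrefixOf ['%', 's'] (c :: rest) = false := by
      cases rest with
      | nil => simp [List.isPrefixOf]
      | cons a b =>
        by_contra hb
        simp [List.isPrefixOf] at hb
        exact h1 b hb.1.symm (by rw [← hb.2])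
    have hne := pvSplit_ne_nil rest
    cases hps : pvSplit rest with
    | nil => exact absurd hps hne
    | cons p ps =>
      rw [convertGo_cons_ne n c rest hpre, pvSplit_cons_ne c rest hpre]
      rw [hps]
      simp [pvCons, ih n, hps]

theorem pvSplit_no_sep (cs : List Char) (h : ¬ ['%', 's'] <:+: cs) : pvSplit cs = [cs] := by
  induction cs using pvSplit.induct with
  | case1 => rfl
  | case2 rest ih => exact absurd ⟨[], rest, rfl⟩ h
  | case3 c rest h1 ih =>
    have hr : ¬ ['%', 's'] <:+: rest := fun hi => h (hi.trans (List.suffix_cons c rest).isInfix)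
    have hpre : List.isPrefixOf ['%', 's'] (c :: rest) = false := by
      cases rest with
      | nil => simp [List.isPrefixOf]
      | cons a b =>
        by_contra hb
        simp [List.isPrefixOf] at hb
        exact h1 b hb.1.symm (by rw [← hb.2])
    rw [pvSplit_cons_ne c rest hpre, ih hr]
    rfl

theorem foldl_render (ps : List (List Char)) (n : Nat) (acc : List (List Char)) :
    (List.foldl (fun acc pi => (acc ++ ['$' :: (PySem.Int.toStr (pi.2 : Int)).toList]) ++ [pi.1])
        acc (ps.zipIdx (n + 1))).flatten = acc.flatten ++ renderTail n ps := by
  induction ps generalizing n acc with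
  | nil => simp [renderTail]
  | cons p rest ih =>
    simp only [List.zipIdx_cons, List.foldl_cons]
    rw [ih (n + 1)]
    simp [renderTail]

-- ===== VERDICT (by name: the statement is the Claim_ definition above) =====
theorem convert_placeholders_spec : Claim_equal_convert_placeholders := by
  intro stmt _
  unfold Spec_convert_placeholders convert_placeholders convert_placeholders_alt
  by_cases hin : PySem.Str.isIn "%s" stmt = false
  · rw [if_pos hin]
    have hni : ¬ ['%', 's'] <:+: stmt.toList := by
      rw [PySem.Str.isIn_eq] at hin
      exact (PySem.Chars.isIn_eq_false_iff _ _).mp (by simpa using hin)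
    rw [convertGo_eq_render, pvSplit_no_sep _ hni]
    simp [renderTail, String.ofList_toList]
  · rw [if_neg hin]
    simp only [splitOn_eq_pvSplit]
    rw [convertGo_eq_render]
    congr 1
    rw [join_nil_eq_flatten]
    have := foldl_render (pvSplit stmt.toList).tail 0 [(pvSplit stmt.toList).headD []]
    simpa using this
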